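-- pv_equiv track=rewrite | github.com/szabo-roland/AoC2020 | 10/10.py | get_partitions
-- ===== SOURCE A (Python) =====
-- def get_partitions(data):
--     result = []
--     temp = []
--     prev = 0
--     for i in data:
--         if i - prev < 3:
--             temp.append(i)
--         else:
--             result.append(temp)
--             temp = [i]
--         prev = i
--
--     return result
-- ===== SOURCE B (Python) =====
-- def get_partitions(data):
--     # Pass 1: record the indices where a gap >= 3 starts a new run.
--     breaks = []
--     prev = 0
--     for idx, i in enumerate(data):
--         if i - prev >= 3:
--             breaks.append(idx)
--         prev = i
--     # Pass 2: emit the slice ending at each break (the run after the last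
--     # break is never emitted, matching A).
--     result = []
--     start = 0
--     for b in breaks:
--         result.append(data[start:b])
--         start = b
--     return result
-- ===== Notes on version B (the rewrite author's own statement) =====
-- stated objective: alternative
-- what changed: Replaces A's single accumulator loop (growing temp lists and flushing them at gaps) by two passes: first collect the indices where a gap >= 3 occurs, then emit the slices of the input between consecutive break indices.
import Mathlib
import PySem

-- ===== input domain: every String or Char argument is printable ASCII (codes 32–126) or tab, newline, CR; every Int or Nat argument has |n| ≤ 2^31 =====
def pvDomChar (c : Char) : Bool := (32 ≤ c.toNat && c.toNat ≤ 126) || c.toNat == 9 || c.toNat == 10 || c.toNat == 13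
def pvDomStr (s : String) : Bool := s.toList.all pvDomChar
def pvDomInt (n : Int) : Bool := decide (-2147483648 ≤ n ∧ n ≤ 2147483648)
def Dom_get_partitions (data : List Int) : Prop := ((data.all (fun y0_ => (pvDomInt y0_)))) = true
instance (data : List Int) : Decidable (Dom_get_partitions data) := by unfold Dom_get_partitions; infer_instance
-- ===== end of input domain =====

-- B replaces A's one-pass accumulator loop by two passes (collect gap indices, then slice
-- the input at those indices); alternative decomposition, same cost, same return value.

-- ===== PORT A =====
-- single fold over data carrying (result, temp, prev)
def get_partitions (data : List Int) : List (List Int) :=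
  (data.foldl
    (fun (st : List (List Int) × List Int × Int) i =>
      if i - st.2.2 < 3 then (st.1, st.2.1 ++ [i], i)
      else (st.1 ++ [st.2.1], [i], i))
    ([], [], 0)).1

-- ===== PORT B =====
-- pass 1: break indices (fold over enumerate, carrying (breaks, prev))
-- pass 2: slice data at consecutive breaks (fold carrying (result, start))
def get_partitions_alt (data : List Int) : List (List Int) :=
  let breaks :=
    ((PySem.List.enumerate data 0).foldl
      (fun (st : List Int × Int) p =>
        (if p.2 - st.2 ≥ 3 then st.1 ++ [p.1] else st.1, p.2))
      ([], 0)).1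
  (breaks.foldl
    (fun (st : List (List Int) × Int) b =>
      (st.1 ++ [PySem.List.slice data (some st.2) (some b)], b))
    ([], 0)).1

-- ===== PRECONDITION & SPEC =====
def Spec_get_partitions (data : List Int) (out : List (List Int)) : Prop := out = get_partitions_alt data
instance (data : List Int) (out : List (List Int)) : Decidable (Spec_get_partitions data out) := by unfold Spec_get_partitions; infer_instance

-- ===== CLAIM (what is proved, stated in full; the proofs are below) =====
def Claim_equal_get_partitions : Prop := ∀ (data : List Int), Dom_get_partitions data → Spec_get_partitions data (get_partitions data)

-- ===== LEMMAS AND PROOFS =====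

-- common recursive specification of the run list (final open run dropped)
def pvSegs : List Int → Int → List Int → List (List Int)
  | [], _, _ => []
  | i :: rest, prev, temp =>
    if i - prev < 3 then pvSegs rest i (temp ++ [i]) else temp :: pvSegs rest i [i]

-- break indices of an enumerated suffix
def pvBrs : List (Int × Int) → Int → List Int
  | [], _ => []
  | (idx, i) :: rest, prev =>
    if i - prev ≥ 3 then idx :: pvBrs rest i else pvBrs rest i

-- slices of data delimited by consecutive break indices
def pvSegFold (data : List Int) : List Int → Int → List (List Int)
  | [], _ => []
  | b :: bs, s => PySem.List.slice data (some s) (some b) :: pvSegFold data bs b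

lemma pvA_loop (rest : List Int) : ∀ (res : List (List Int)) (temp : List Int) (prev : Int),
    (rest.foldl
      (fun (st : List (List Int) × List Int × Int) i =>
        if i - st.2.2 < 3 then (st.1, st.2.1 ++ [i], i)
        else (st.1 ++ [st.2.1], [i], i))
      (res, temp, prev)).1 = res ++ pvSegs rest prev temp := by
  induction rest with
  | nil => intro res temp prev; simp [pvSegs]
  | cons i rest ih =>
    intro res temp prev
    simp only [List.foldl_cons, pvSegs]
    by_cases h : i - prev < 3
    · simp [h, ih]
    · simp [h, ih]

lemma pvBr_loop (l : List (Int × Int)) : ∀ (acc : List Int) (prev : Int),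
    (l.foldl
      (fun (st : List Int × Int) p =>
        (if p.2 - st.2 ≥ 3 then st.1 ++ [p.1] else st.1, p.2))
      (acc, prev)).1 = acc ++ pvBrs l prev := by
  induction l with
  | nil => intro acc prev; simp [pvBrs]
  | cons p l ih =>
    intro acc prev
    obtain ⟨idx, i⟩ := p
    simp only [List.foldl_cons, pvBrs]
    by_cases h : i - prev ≥ 3
    · simp [h, ih]
    · simp [h, ih]

lemma pvSeg_loop (data : List Int) (bs : List Int) : ∀ (acc : List (List Int)) (s : Int),
    (bs.foldl
      (fun (st : List (List Int) × Int) b =>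
        (st.1 ++ [PySem.List.slice data (some st.2) (some b)], b))
      (acc, s)).1 = acc ++ pvSegFold data bs s := by
  induction bs with
  | nil => intro acc s; simp [pvSegFold]
  | cons b bs ih =>
    intro acc s
    simp [List.foldl_cons, pvSegFold, ih]

lemma pvMain (data : List Int) : ∀ (rest : List Int) (k start : Nat) (prev : Int),
    data.drop k = rest → start ≤ k →
    pvSegFold data (pvBrs (PySem.List.enumerate rest (k : Int)) prev) (start : Int)
      = pvSegs rest prev ((data.drop start).take (k - start)) := by
  intro rest
  induction rest with
  | nil => intro k start prev _ _; rw [PySem.List.enumerate_nil]; rfl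
  | cons i rest ih =>
    intro k start prev hdrop hle
    have hrest : data.drop (k + 1) = rest := by
      rw [← List.tail_drop, hdrop]; rfl
    have hget : data[k]? = some i := by
      have : (data.drop k)[0]? = some i := by rw [hdrop]; rfl
      simpa using this
    rw [PySem.List.enumerate_cons, pvBrs]
    by_cases h : i - prev ≥ 3
    · rw [if_pos h, pvSegFold]
      have hcast : (k : Int) + 1 = ((k + 1 : Nat) : Int) := by push_cast; ring
      rw [hcast, ih (k + 1) k i hrest (Nat.le_succ k)]
      have htake : (data.drop k).take (k + 1 - k) = [i] := by
        have : k + 1 - k = 1 := by omega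
        rw [this, hdrop]; rfl
      rw [htake, pvSegs, if_neg (by omega), PySem.List.slice_natCast]
    · rw [if_neg h]
      have hcast : (k : Int) + 1 = ((k + 1 : Nat) : Int) := by push_cast; ring
      rw [hcast, ih (k + 1) start i hrest (by omega)]
      have htake : (data.drop start).take (k + 1 - start)
          = (data.drop start).take (k - start) ++ [i] := by
        have h1 : k + 1 - start = (k - start) + 1 := by omega
        rw [h1, List.take_add_one]
        have h2 : (data.drop start)[k - start]? = some i := by
          rw [List.getElem?_drop]
          have : start + (k - start) = k := by omega
          rw [this]; exact hget
        simp [h2]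
      rw [htake, pvSegs, if_pos (by omega)]

-- ===== VERDICT (by name: the statement is the Claim_ definition above) =====
theorem get_partitions_spec : Claim_equal_get_partitions := by
  intro data _
  unfold Spec_get_partitions get_partitions get_partitions_alt
  rw [pvA_loop, pvBr_loop, pvSeg_loop]
  rw [List.nil_append, List.nil_append, List.nil_append]
  have h := pvMain data data 0 0 0 (by simp) (le_refl 0)
  simpa using h.symm
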